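-- pv_equiv track=rewrite | github.com/Th0rgal/morpho-verity | scripts/workflow_run_parser.py | _strip_yaml_comment
-- ===== SOURCE A (Python) =====
-- def _strip_yaml_comment(raw: str) -> str:
--   in_single_quote = False
--   in_double_quote = False
--   escape = False
--   for index, char in enumerate(raw):
--     if in_single_quote:
--       if char == "'":
--         in_single_quote = False
--       continue
--     if in_double_quote:
--       if escape:
--         escape = False
--         continue
--       if char == "\\":
--         escape = True
--         continue
--       if char == '"':
--         in_double_quote = False
--       continue
--     if char == "'":
--       in_single_quote = True
--       continue
--     if char == '"':
--       in_double_quote = True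
--       continue
--     if char == "#" and (index == 0 or raw[index - 1].isspace()):
--       return raw[:index].rstrip()
--   return raw
-- ===== SOURCE B (Python) =====
-- def _min_cand(a, b):
--     # combine two find() results, -1 meaning "not found"
--     if a == -1:
--         return b
--     if b == -1:
--         return a
--     return min(a, b)
--
--
-- def _skip_double(raw, j):
--     # index just past the closing double quote, or -1 if unterminated;
--     # a '"' closes iff preceded by an even run of backslashes
--     while True:
--         q = raw.find('"', j)
--         if q == -1:
--             return -1
--         b = 0
--         while q - 1 - b >= j and raw[q - 1 - b] == "\\":
--             b += 1
--         if b % 2 == 0: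
--             return q + 1
--         j = q + 1
--
--
-- def _strip_yaml_comment(raw: str) -> str:
--     i = 0
--     while True:
--         p = _min_cand(raw.find("'", i), _min_cand(raw.find('"', i), raw.find("#", i)))
--         if p == -1:
--             return raw
--         ch = raw[p]
--         if ch == "'":
--             close = raw.find("'", p + 1)
--             if close == -1:
--                 return raw
--             i = close + 1
--         elif ch == '"':
--             nxt = _skip_double(raw, p + 1)
--             if nxt == -1:
--                 return raw
--             i = nxt
--         elif p == 0 or raw[p - 1].isspace():
--             return raw[:p].rstrip()
--         else:
--             i = p + 1
-- ===== Notes on version B (the rewrite author's own statement) =====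
-- stated objective: faster
-- what changed: Replaces the char-by-char three-flag state machine by a jump scanner: str.find locates the next single quote, double quote or hash, a single str.find locates the closing single quote, and a closing double quote is recognised by the parity of the backslash run immediately before each candidate instead of tracking an escape flag.
import Mathlib
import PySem

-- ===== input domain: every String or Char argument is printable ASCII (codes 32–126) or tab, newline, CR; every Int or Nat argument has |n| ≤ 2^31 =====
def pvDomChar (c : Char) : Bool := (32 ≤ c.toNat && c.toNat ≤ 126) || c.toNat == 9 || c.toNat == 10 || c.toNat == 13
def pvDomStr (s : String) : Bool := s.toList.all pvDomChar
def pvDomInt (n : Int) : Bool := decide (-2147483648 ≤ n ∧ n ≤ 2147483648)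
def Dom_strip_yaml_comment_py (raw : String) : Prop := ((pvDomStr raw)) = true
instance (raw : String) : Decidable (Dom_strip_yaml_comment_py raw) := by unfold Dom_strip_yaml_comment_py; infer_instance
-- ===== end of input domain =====

-- B replaces A's char-by-char three-flag state machine by a jump scanner built on
-- str.find plus a backslash-run parity test for closing double quotes (objective:
-- faster by a constant factor, measured).

-- ===== PORT A =====
-- enumerate(raw) as (index, char) pairs
def pvEnumFrom : Nat → List Char → List (Nat × Char)
  | _, [] => []
  | i, c :: cs => (i, c) :: pvEnumFrom (i + 1) cs

-- A's for-loop: flags in_single_quote / in_double_quote / escape; 'some idx' = the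
-- early 'return raw[:index].rstrip()', 'none' = the loop ran off the end.
def stripA_loop (cs : List Char) (pairs : List (Nat × Char)) (sq dq esc : Bool) :
    Option Nat :=
  match pairs with
  | [] => none
  | (idx, c) :: rest =>
    if sq then
      stripA_loop cs rest (if c = '\'' then false else sq) dq esc
    else if dq then
      if esc then stripA_loop cs rest sq dq false
      else if c = '\\' then stripA_loop cs rest sq dq true
      else stripA_loop cs rest sq (if c = '"' then false else dq) esc
    else if c = '\'' then stripA_loop cs rest true dq esc
    else if c = '"' then stripA_loop cs rest sq true esc
    else if c = '#' ∧ (idx = 0 ∨ PySem.Chars.isspace (cs.getD (idx - 1) ' ') = true) then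
      some idx
    else stripA_loop cs rest sq dq esc

def strip_yaml_comment_py (raw : String) : String :=
  let cs := raw.toList
  match stripA_loop cs (pvEnumFrom 0 cs) false false false with
  | some idx => String.ofList (PySem.Chars.rstrip (cs.take idx))  -- raw[:index].rstrip(), index ≥ 0
  | none => raw

-- ===== PORT B =====
-- raw.find(c, i): first index >= i (< n) holding c, as an Option (-1 = none); the
-- fuel argument n - i only makes the loop structural, it never cuts it short
def findFromGo (cs : List Char) (c : Char) : Nat → Nat → Option Nat
  | 0, _ => none
  | fuel + 1, i =>
    if cs.getD i ' ' = c then some i else findFromGo cs c fuel (i + 1)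

def findFrom (cs : List Char) (n i : Nat) (c : Char) : Option Nat :=
  findFromGo cs c (n - i) i

-- _min_cand: combine two find results (none = -1 = not found)
def minCand (a b : Option Nat) : Option Nat :=
  match a with
  | none => b
  | some x =>
    match b with
    | none => some x
    | some y => some (min x y)

-- the inner backslash-counting while loop of _skip_double:
-- length of the backslash run immediately before position q, not reaching below j
def backCount (cs : List Char) (j q : Nat) : Nat :=
  if _ : j < q ∧ cs.getD (q - 1) ' ' = '\\' then backCount cs j (q - 1) + 1 else 0
termination_by q

-- _skip_double's outer while loop ('none' = return -1, 'some r' = return q + 1);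
-- fuel n - j bounds the iteration count (j strictly grows), it never cuts the loop short
def skipDoubleGo (cs : List Char) (n : Nat) : Nat → Nat → Option Nat
  | 0, _ => none
  | fuel + 1, j =>
    match findFrom cs n j '"' with
    | none => none
    | some q =>
      if backCount cs j q % 2 = 0 then some (q + 1) else skipDoubleGo cs n fuel (q + 1)

def skipDouble (cs : List Char) (n j : Nat) : Option Nat :=
  skipDoubleGo cs n (n - j) j

-- B's outer while loop; fuel n - i bounds the iteration count (i strictly grows)
def stripBGo (raw : String) (cs : List Char) (n : Nat) : Nat → Nat → String
  | 0, _ => raw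
  | fuel + 1, i =>
    match minCand (findFrom cs n i '\'') (minCand (findFrom cs n i '"') (findFrom cs n i '#')) with
    | none => raw
    | some p =>
      if cs.getD p ' ' = '\'' then
        match findFrom cs n (p + 1) '\'' with
        | none => raw
        | some close => stripBGo raw cs n fuel (close + 1)
      else if cs.getD p ' ' = '"' then
        match skipDouble cs n (p + 1) with
        | none => raw
        | some nxt => stripBGo raw cs n fuel nxt
      else if p = 0 ∨ PySem.Chars.isspace (cs.getD (p - 1) ' ') = true then
        String.ofList (PySem.Chars.rstrip (cs.take p))  -- raw[:p].rstrip()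
      else stripBGo raw cs n fuel (p + 1)

def strip_yaml_comment_py_alt (raw : String) : String :=
  let cs := raw.toList
  stripBGo raw cs cs.length cs.length 0

-- ===== PRECONDITION & SPEC =====
def Spec_strip_yaml_comment_py (raw : String) (out : String) : Prop := out = strip_yaml_comment_py_alt raw
instance (raw : String) (out : String) : Decidable (Spec_strip_yaml_comment_py raw out) := by unfold Spec_strip_yaml_comment_py; infer_instance

-- ===== CLAIM (what is proved, stated in full; the proofs are below) =====
def Claim_equal_strip_yaml_comment_py : Prop := ∀ (raw : String), Dom_strip_yaml_comment_py raw → Spec_strip_yaml_comment_py raw (strip_yaml_comment_py raw)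

-- ===== LEMMAS AND PROOFS =====

-- A's loop in each of its reachable states, started at index i
def Aplain (cs : List Char) (i : Nat) : Option Nat :=
  stripA_loop cs (pvEnumFrom i (cs.drop i)) false false false
def Asq (cs : List Char) (i : Nat) : Option Nat :=
  stripA_loop cs (pvEnumFrom i (cs.drop i)) true false false
def Adq (cs : List Char) (i : Nat) : Option Nat :=
  stripA_loop cs (pvEnumFrom i (cs.drop i)) false true false

theorem pvEnumFrom_drop_cons (cs : List Char) (i : Nat) (h : i < cs.length) :
    pvEnumFrom i (cs.drop i) = (i, cs[i]) :: pvEnumFrom (i + 1) (cs.drop (i + 1)) := by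
  rw [List.drop_eq_getElem_cons h]
  rfl

theorem pvEnumFrom_drop_nil (cs : List Char) (i : Nat) (h : ¬ i < cs.length) :
    pvEnumFrom i (cs.drop i) = [] := by
  rw [List.drop_eq_nil_iff.mpr (by omega)]
  rfl

theorem getD_of_lt (cs : List Char) (i : Nat) (h : i < cs.length) :
    cs.getD i ' ' = cs[i] := List.getD_eq_getElem cs ' ' h

-- A in the escape state consumes one char and returns to the plain double-quote state
theorem Aesc_step (cs : List Char) (i : Nat) :
    stripA_loop cs (pvEnumFrom i (cs.drop i)) false true true = Adq cs (i + 1) := by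
  by_cases h : i < cs.length
  · rw [pvEnumFrom_drop_cons cs i h]
    simp [stripA_loop, Adq]
  · rw [pvEnumFrom_drop_nil cs i h, Adq, pvEnumFrom_drop_nil cs (i + 1) (by omega)]
    rfl

-- unfolding equations for the wrapped find
theorem findFrom_end (cs : List Char) (n i : Nat) (c : Char) (h : ¬ i < n) :
    findFrom cs n i c = none := by
  unfold findFrom
  rw [show n - i = 0 from by omega]
  rfl

theorem findFrom_step (cs : List Char) (n i : Nat) (c : Char) (h : i < n) :
    findFrom cs n i c =
      if cs.getD i ' ' = c then some i else findFrom cs n (i + 1) c := by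
  unfold findFrom
  rw [show n - i = (n - (i + 1)) + 1 from by omega]
  rfl

-- findFromGo characterisations
theorem findFromGo_ge (cs : List Char) (c : Char) (fuel i q : Nat)
    (h : findFromGo cs c fuel i = some q) : i ≤ q := by
  induction fuel generalizing i with
  | zero => cases h
  | succ f ih =>
    unfold findFromGo at h
    split at h
    · cases h; exact le_refl _
    · exact le_trans (Nat.le_succ i) (ih (i + 1) h)

theorem findFromGo_lt (cs : List Char) (c : Char) (fuel i q : Nat)
    (h : findFromGo cs c fuel i = some q) : q < i + fuel := by
  induction fuel generalizing i with
  | zero => cases h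
  | succ f ih =>
    unfold findFromGo at h
    split at h
    · cases h; omega
    · have := ih (i + 1) h; omega

theorem findFromGo_get (cs : List Char) (c : Char) (fuel i q : Nat)
    (h : findFromGo cs c fuel i = some q) : cs.getD q ' ' = c := by
  induction fuel generalizing i with
  | zero => cases h
  | succ f ih =>
    unfold findFromGo at h
    split at h
    · cases h; assumption
    · exact ih (i + 1) h

theorem findFromGo_before (cs : List Char) (c : Char) (fuel i q : Nat)
    (h : findFromGo cs c fuel i = some q) :
    ∀ k, i ≤ k → k < q → cs.getD k ' ' ≠ c := by
  induction fuel generalizing i with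
  | zero => cases h
  | succ f ih =>
    intro k h1 h2
    unfold findFromGo at h
    split at h
    · cases h; omega
    · rcases Nat.eq_or_lt_of_le h1 with rfl | hlt
      · assumption
      · exact ih (i + 1) h k hlt h2

theorem findFromGo_none (cs : List Char) (c : Char) (fuel i n : Nat)
    (hf : n - i ≤ fuel) (h : findFromGo cs c fuel i = none) :
    ∀ k, i ≤ k → k < n → cs.getD k ' ' ≠ c := by
  induction fuel generalizing i with
  | zero => intro k h1 h2; omega
  | succ f ih =>
    intro k h1 h2
    unfold findFromGo at h
    split at h
    · cases h
    · rcases Nat.eq_or_lt_of_le h1 with rfl | hlt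
      · assumption
      · exact ih (i + 1) (by omega) h k hlt h2

-- wrapper forms
theorem findFrom_ge (cs : List Char) (n i : Nat) (c : Char) (q : Nat)
    (h : findFrom cs n i c = some q) : i ≤ q :=
  findFromGo_ge cs c (n - i) i q h

theorem findFrom_lt (cs : List Char) (n i : Nat) (c : Char) (q : Nat)
    (h : findFrom cs n i c = some q) : q < n := by
  have h1 := findFromGo_lt cs c (n - i) i q h
  have h2 := findFromGo_ge cs c (n - i) i q h
  omega

theorem findFrom_get (cs : List Char) (n i : Nat) (c : Char) (q : Nat)
    (h : findFrom cs n i c = some q) : cs.getD q ' ' = c :=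
  findFromGo_get cs c (n - i) i q h

theorem findFrom_before (cs : List Char) (n i : Nat) (c : Char) (q : Nat)
    (h : findFrom cs n i c = some q) :
    ∀ k, i ≤ k → k < q → cs.getD k ' ' ≠ c :=
  findFromGo_before cs c (n - i) i q h

theorem findFrom_none (cs : List Char) (n i : Nat) (c : Char)
    (h : findFrom cs n i c = none) :
    ∀ k, i ≤ k → k < n → cs.getD k ' ' ≠ c :=
  findFromGo_none cs c (n - i) i n (le_refl _) h

theorem skipDoubleGo_gt (cs : List Char) (n : Nat) (fuel j r : Nat)
    (h : skipDoubleGo cs n fuel j = some r) : j < r := by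
  induction fuel generalizing j with
  | zero => cases h
  | succ f ih =>
    unfold skipDoubleGo at h
    split at h
    · cases h
    · rename_i q hq
      have h1 := findFrom_ge cs n j '"' q hq
      split at h
      · cases h; omega
      · have := ih (q + 1) h; omega

theorem skipDouble_gt (cs : List Char) (n j : Nat) (r : Nat)
    (h : skipDouble cs n j = some r) : j < r :=
  skipDoubleGo_gt cs n (n - j) j r h

-- backCount characterisations (b = run of backslashes right before q, clamped at j)
theorem backCount_le (cs : List Char) (j q : Nat) : backCount cs j q ≤ q - j := by
  unfold backCount
  split
  · rename_i h
    have := backCount_le cs j (q - 1)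
    omega
  · omega
termination_by q

theorem backCount_run (cs : List Char) (j q : Nat) :
    ∀ k, q - backCount cs j q ≤ k → k < q → cs.getD k ' ' = '\\' := by
  intro k h1 h2
  unfold backCount at h1
  split at h1
  · rename_i h
    rcases Nat.eq_or_lt_of_le (Nat.le_sub_one_of_lt h2) with heq | hlt
    · rw [← heq] at h; exact h.2
    · exact backCount_run cs j (q - 1) k (by omega) (by omega)
  · omega
termination_by q

theorem backCount_max (cs : List Char) (j q : Nat) (hjq : j ≤ q) :
    q - backCount cs j q = j ∨ cs.getD (q - backCount cs j q - 1) ' ' ≠ '\\' := by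
  unfold backCount
  split
  · rename_i h
    have h1 := backCount_max cs j (q - 1) (by omega)
    have h2 := backCount_le cs j (q - 1)
    rcases h1 with h1 | h1
    · left; omega
    · right
      have : q - (backCount cs j (q - 1) + 1) - 1 = q - 1 - backCount cs j (q - 1) - 1 := by omega
      rw [this]; exact h1
  · rename_i h
    rcases Nat.eq_or_lt_of_le hjq with rfl | hlt
    · left; omega
    · right
      simp only [Nat.sub_zero]
      intro hc
      exact h ⟨hlt, hc⟩
termination_by q

-- A's single-quote state ends exactly at the next single quote (or never)
theorem Asq_eq (cs : List Char) (i : Nat) :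
    Asq cs i = match findFrom cs cs.length i '\'' with
      | some q => Aplain cs (q + 1)
      | none => none := by
  by_cases h : i < cs.length
  · rw [findFrom_step cs cs.length i '\'' h]
    rw [Asq, pvEnumFrom_drop_cons cs i h]
    rw [getD_of_lt cs i h]
    by_cases hc : cs[i] = '\''
    · rw [if_pos hc]
      simp [stripA_loop, hc, Aplain]
    · rw [if_neg hc]
      rw [show stripA_loop cs ((i, cs[i]) :: pvEnumFrom (i + 1) (cs.drop (i + 1))) true false false
            = Asq cs (i + 1) from by simp [stripA_loop, hc, Asq]]
      exact Asq_eq cs (i + 1)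
  · rw [findFrom_end cs cs.length i '\'' h, Asq, pvEnumFrom_drop_nil cs i h]
    rfl
termination_by cs.length - i

-- plain state skips chars that are none of ' " #
theorem Aplain_skip (cs : List Char) (i p : Nat) (hip : i ≤ p)
    (h : ∀ k, i ≤ k → k < p →
      cs.getD k ' ' ≠ '\'' ∧ cs.getD k ' ' ≠ '"' ∧ cs.getD k ' ' ≠ '#') :
    Aplain cs i = Aplain cs p := by
  rcases Nat.eq_or_lt_of_le hip with rfl | hlt
  · rfl
  · by_cases hn : i < cs.length
    · have hi := h i (le_refl i) hlt
      rw [getD_of_lt cs i hn] at hi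
      rw [Aplain, pvEnumFrom_drop_cons cs i hn]
      rw [show stripA_loop cs ((i, cs[i]) :: pvEnumFrom (i + 1) (cs.drop (i + 1))) false false false
            = Aplain cs (i + 1) from by
        simp only [stripA_loop, Aplain]
        rw [if_neg (by simp), if_neg (by simp), if_neg hi.1, if_neg hi.2.1,
          if_neg (by intro hc; exact hi.2.2 hc.1)]]
      exact Aplain_skip cs (i + 1) p hlt (fun k h1 h2 => h k (by omega) h2)
    · rw [Aplain, pvEnumFrom_drop_nil cs i hn,
        Aplain, pvEnumFrom_drop_nil cs p (by omega)]
termination_by p - i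

theorem Aplain_end (cs : List Char) (i : Nat) (h : ¬ i < cs.length) :
    Aplain cs i = none := by
  rw [Aplain, pvEnumFrom_drop_nil cs i h]; rfl

-- the double-quote state crosses the region up to the next '"' and closes there
-- iff the backslash run before it has even length
theorem Adq_reach (cs : List Char) (j q b : Nat)
    (hjq : j ≤ q)
    (hq : cs.getD q ' ' = '"')
    (hbefore : ∀ k, j ≤ k → k < q → cs.getD k ' ' ≠ '"')
    (hble : b ≤ q - j)
    (hrun : ∀ k, q - b ≤ k → k < q → cs.getD k ' ' = '\\')
    (hmax : q - b = j ∨ cs.getD (q - b - 1) ' ' ≠ '\\')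
    (hqn : q < cs.length) :
    Adq cs j = if b % 2 = 0 then Aplain cs (q + 1) else Adq cs (q + 1) := by
  rcases Nat.eq_or_lt_of_le hjq with rfl | hlt
  · -- j = q: the quote closes immediately; b = 0
    have hb0 : b = 0 := by omega
    subst hb0
    rw [Adq, pvEnumFrom_drop_cons cs j hqn]
    rw [getD_of_lt cs j hqn] at hq
    simp [stripA_loop, hq, Aplain]
  · have hjn : j < cs.length := by omega
    have hcj := hbefore j (le_refl j) hlt
    by_cases hbs : cs.getD j ' ' = '\\'
    · -- a backslash: A consumes it and the following char
      have hstep : Adq cs j = Adq cs (j + 2) := by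
        rw [Adq, pvEnumFrom_drop_cons cs j hjn]
        rw [getD_of_lt cs j hjn] at hbs hcj
        rw [show stripA_loop cs ((j, cs[j]) :: pvEnumFrom (j + 1) (cs.drop (j + 1))) false true false
              = stripA_loop cs (pvEnumFrom (j + 1) (cs.drop (j + 1))) false true true from by
          simp [stripA_loop, hbs]]
        rw [Aesc_step]
      by_cases hin : q - b ≤ j
      · -- j lies inside the backslash run, so q - b = j and b = q - j
        have hqb : q - b = j := by omega
        have hb : b = q - j := by omega
        rcases Nat.eq_or_lt_of_le (show j + 1 ≤ q by omega) with h1 | h1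
        · -- b = 1: the escape consumes the quote itself
          have hb1 : b = 1 := by omega
          rw [hstep, hb1]
          rw [show j + 2 = q + 1 by omega]
          simp
        · -- b ≥ 2: strip two backslashes and recurse
          have hb2 : 2 ≤ b := by omega
          rw [hstep]
          have := Adq_reach cs (j + 2) q (b - 2) (by omega) hq
            (fun k h1 h2 => hbefore k (by omega) h2) (by omega)
            (fun k h1 h2 => hrun k (by omega) h2) (by left; omega) hqn
          rw [this]
          have hpar : (b - 2) % 2 = b % 2 := by omega
          rw [hpar]
      · -- j is strictly before the run
        have hin' : j < q - b := by omega
        have hj2 : j + 2 ≤ q - b := by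
          rcases hmax with hm | hm
          · omega
          · by_cases hx : j + 2 ≤ q - b
            · exact hx
            · exfalso
              have : j = q - b - 1 := by omega
              rw [← this] at hm
              exact hm hbs
        rw [hstep]
        exact Adq_reach cs (j + 2) q b (by omega) hq
          (fun k h1 h2 => hbefore k (by omega) h2) (by omega) hrun
          (by
            rcases hmax with hm | hm
            · omega
            · exact Or.inr hm) hqn
    · -- an ordinary char inside the double quotes
      have hjrun : j < q - b := by
        by_cases hx : j < q - b
        · exact hx
        · exact absurd (hrun j (by omega) hlt) hbs
      rw [show Adq cs j = Adq cs (j + 1) from by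
        rw [Adq, pvEnumFrom_drop_cons cs j hjn]
        rw [getD_of_lt cs j hjn] at hbs hcj
        simp [stripA_loop, hbs, hcj, Adq]]
      exact Adq_reach cs (j + 1) q b (by omega) hq
        (fun k h1 h2 => hbefore k (by omega) h2) (by omega) hrun
        (by
          rcases hmax with hm | hm
          · omega
          · exact Or.inr hm) hqn
termination_by q - j

-- no '"' ahead: the double-quote state never ends
theorem Adq_none (cs : List Char) (j : Nat)
    (h : ∀ k, j ≤ k → k < cs.length → cs.getD k ' ' ≠ '"') :
    Adq cs j = none := by
  by_cases hj : j < cs.length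
  · have hcj := h j (le_refl j) hj
    by_cases hbs : cs.getD j ' ' = '\\'
    · rw [show Adq cs j = Adq cs (j + 2) from by
        rw [Adq, pvEnumFrom_drop_cons cs j hj]
        rw [getD_of_lt cs j hj] at hbs
        rw [show stripA_loop cs ((j, cs[j]) :: pvEnumFrom (j + 1) (cs.drop (j + 1))) false true false
              = stripA_loop cs (pvEnumFrom (j + 1) (cs.drop (j + 1))) false true true from by
          simp [stripA_loop, hbs]]
        rw [Aesc_step]]
      exact Adq_none cs (j + 2) (fun k h1 h2 => h k (by omega) h2)
    · rw [show Adq cs j = Adq cs (j + 1) from by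
        rw [Adq, pvEnumFrom_drop_cons cs j hj]
        rw [getD_of_lt cs j hj] at hbs hcj
        simp [stripA_loop, hbs, hcj, Adq]]
      exact Adq_none cs (j + 1) (fun k h1 h2 => h k (by omega) h2)
  · rw [Adq, pvEnumFrom_drop_nil cs j hj]; rfl
termination_by cs.length - j

-- the double-quote state matches _skip_double exactly
theorem AdqGo_eq (cs : List Char) (fuel j : Nat) (hf : cs.length - j ≤ fuel) :
    Adq cs j = match skipDoubleGo cs cs.length fuel j with
      | some r => Aplain cs r
      | none => none := by
  induction fuel generalizing j with
  | zero =>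
    have hj : ¬ j < cs.length := by omega
    rw [Adq_none cs j (fun k h1 h2 => by omega)]
    rfl
  | succ f ih =>
    unfold skipDoubleGo
    cases hq : findFrom cs cs.length j '"' with
    | none =>
      simp only
      exact Adq_none cs j (findFrom_none cs cs.length j '"' hq)
    | some q =>
      simp only
      have hge := findFrom_ge cs cs.length j '"' q hq
      have hlt := findFrom_lt cs cs.length j '"' q hq
      have hget := findFrom_get cs cs.length j '"' q hq
      have hbef := findFrom_before cs cs.length j '"' q hq
      have hmain := Adq_reach cs j q (backCount cs j q) hge hget hbef
        (backCount_le cs j q) (backCount_run cs j q) (backCount_max cs j q hge) hlt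
      by_cases hpar : backCount cs j q % 2 = 0
      · rw [if_pos hpar] at hmain ⊢
        exact hmain
      · rw [if_neg hpar] at hmain ⊢
        rw [hmain]
        exact ih (q + 1) (by omega)

theorem Adq_eq (cs : List Char) (j : Nat) :
    Adq cs j = match skipDouble cs cs.length j with
      | some r => Aplain cs r
      | none => none :=
  AdqGo_eq cs (cs.length - j) j (le_refl _)

-- facts about the combined find: p is the least position of any of the three chars
theorem minCand3_none (a b c : Option Nat)
    (h : minCand a (minCand b c) = none) : a = none ∧ b = none ∧ c = none := by
  cases a <;> cases b <;> cases c <;> simp [minCand] at h ⊢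

theorem minCand3_some (a b c : Option Nat) (m : Nat)
    (h : minCand a (minCand b c) = some m) :
    (a = some m ∨ b = some m ∨ c = some m) ∧
      (∀ x, a = some x → m ≤ x) ∧ (∀ x, b = some x → m ≤ x) ∧ (∀ x, c = some x → m ≤ x) := by
  cases a <;> cases b <;> cases c <;>
    simp [minCand] at h ⊢ <;>
    omega

-- the combined find yields a position between i and n
theorem minCand_find_pos (cs : List Char) (n i p : Nat)
    (h : minCand (findFrom cs n i '\'')
      (minCand (findFrom cs n i '"') (findFrom cs n i '#')) = some p) :
    i ≤ p ∧ p < n := by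
  have key : ∀ (a b : Option Nat) (m : Nat), minCand a b = some m →
      a = some m ∨ b = some m := by
    intro a b m hm
    cases a with
    | none => exact Or.inr hm
    | some x =>
      cases b with
      | none => exact Or.inl hm
      | some y =>
        simp [minCand] at hm
        rcases le_total x y with hxy | hxy
        · left; rw [min_eq_left hxy] at hm; rw [hm]
        · right; rw [min_eq_right hxy] at hm; rw [hm]
    
  rcases key _ _ p h with h1 | h23
  · exact ⟨findFrom_ge cs n i '\'' p h1, findFrom_lt cs n i '\'' p h1⟩
  · rcases key _ _ p h23 with h2 | h3
    · exact ⟨findFrom_ge cs n i '"' p h2, findFrom_lt cs n i '"' p h2⟩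
    · exact ⟨findFrom_ge cs n i '#' p h3, findFrom_lt cs n i '#' p h3⟩

-- one plain-state step of A at a known character
theorem Aplain_step_squote (cs : List Char) (p : Nat) (hn : p < cs.length)
    (hc : cs.getD p ' ' = '\'') : Aplain cs p = Asq cs (p + 1) := by
  rw [getD_of_lt cs p hn] at hc
  rw [Aplain, pvEnumFrom_drop_cons cs p hn]
  simp [stripA_loop, hc, Asq]

theorem Aplain_step_dquote (cs : List Char) (p : Nat) (hn : p < cs.length)
    (hc : cs.getD p ' ' = '"') : Aplain cs p = Adq cs (p + 1) := by
  rw [getD_of_lt cs p hn] at hc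
  rw [Aplain, pvEnumFrom_drop_cons cs p hn]
  simp [stripA_loop, hc, Adq]

theorem Aplain_step_hash_true (cs : List Char) (p : Nat) (hn : p < cs.length)
    (hc : cs.getD p ' ' = '#')
    (hcond : p = 0 ∨ PySem.Chars.isspace (cs.getD (p - 1) ' ') = true) :
    Aplain cs p = some p := by
  rw [getD_of_lt cs p hn] at hc
  rw [Aplain, pvEnumFrom_drop_cons cs p hn]
  have h1 : cs[p] ≠ '\'' := by rw [hc]; decide
  have h2 : cs[p] ≠ '"' := by rw [hc]; decide
  simp only [stripA_loop, Bool.false_eq_true, if_false, if_neg h1, if_neg h2]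
  rw [if_pos ⟨hc, hcond⟩]

theorem Aplain_step_hash_false (cs : List Char) (p : Nat) (hn : p < cs.length)
    (hc : cs.getD p ' ' = '#')
    (hcond : ¬ (p = 0 ∨ PySem.Chars.isspace (cs.getD (p - 1) ' ') = true)) :
    Aplain cs p = Aplain cs (p + 1) := by
  rw [getD_of_lt cs p hn] at hc
  rw [Aplain, pvEnumFrom_drop_cons cs p hn]
  have h1 : cs[p] ≠ '\'' := by rw [hc]; decide
  have h2 : cs[p] ≠ '"' := by rw [hc]; decide
  simp only [stripA_loop, Bool.false_eq_true, if_false, if_neg h1, if_neg h2]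
  rw [if_neg (by rw [hc]; intro hx; exact hcond hx.2)]
  rfl

-- main correspondence: B's jump scanner computes A's loop result
theorem scanGo_eq (raw : String) (cs : List Char) (fuel i : Nat)
    (hf : cs.length - i ≤ fuel) :
    stripBGo raw cs cs.length fuel i =
      (match Aplain cs i with
        | some idx => String.ofList (PySem.Chars.rstrip (cs.take idx))
        | none => raw) := by
  induction fuel generalizing i with
  | zero =>
    rw [Aplain_end cs i (by omega)]
    rfl
  | succ f ih =>
    unfold stripBGo
    split
    · rename_i hp
      obtain ⟨h1, h2, h3⟩ := minCand3_none _ _ _ hp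
      have hnone : Aplain cs i = none := by
        by_cases hin : i < cs.length
        · rw [Aplain_skip cs i cs.length (by omega)
            (fun k hk1 hk2 => ⟨findFrom_none cs cs.length i '\'' h1 k hk1 hk2,
              findFrom_none cs cs.length i '"' h2 k hk1 hk2,
              findFrom_none cs cs.length i '#' h3 k hk1 hk2⟩)]
          exact Aplain_end cs cs.length (by omega)
        · exact Aplain_end cs i hin
      rw [hnone]
    · rename_i p hp
      obtain ⟨hone, hb1, hb2, hb3⟩ := minCand3_some _ _ _ p hp
      obtain ⟨hip, hpn⟩ := minCand_find_pos cs cs.length i p hp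
      have hbeforeAll : ∀ (c : Char), (∀ x, findFrom cs cs.length i c = some x → p ≤ x) →
          ∀ k, i ≤ k → k < p → cs.getD k ' ' ≠ c := by
        intro c hbc k hk1 hk2
        cases hc : findFrom cs cs.length i c with
        | none => exact findFrom_none cs cs.length i c hc k hk1 (by omega)
        | some a =>
          have := hbc a hc
          exact findFrom_before cs cs.length i c a hc k hk1 (by omega)
      have hskip : Aplain cs i = Aplain cs p :=
        Aplain_skip cs i p hip (fun k hk1 hk2 =>
          ⟨hbeforeAll '\'' hb1 k hk1 hk2, hbeforeAll '"' hb2 k hk1 hk2,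
            hbeforeAll '#' hb3 k hk1 hk2⟩)
      by_cases hc1 : cs.getD p ' ' = '\''
      · rw [if_pos hc1, hskip, Aplain_step_squote cs p hpn hc1, Asq_eq]
        split
        · rename_i hcl
          rw [hcl]
        · rename_i close hcl
          have hge := findFrom_ge cs cs.length (p + 1) '\'' close hcl
          simp only [hcl]
          exact ih (close + 1) (by omega)
      · rw [if_neg hc1]
        by_cases hc2 : cs.getD p ' ' = '"'
        · rw [if_pos hc2, hskip, Aplain_step_dquote cs p hpn hc2, Adq_eq]
          split
          · rename_i hsd
            rw [hsd]
          · rename_i nxt hsd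
            have hgt := skipDouble_gt cs cs.length (p + 1) nxt hsd
            simp only [hsd]
            exact ih nxt (by omega)
        · rw [if_neg hc2]
          have hc3 : cs.getD p ' ' = '#' := by
            rcases hone with h | h | h
            · exact absurd (findFrom_get cs cs.length i '\'' p h) hc1
            · exact absurd (findFrom_get cs cs.length i '"' p h) hc2
            · exact findFrom_get cs cs.length i '#' p h
          by_cases hcond : p = 0 ∨ PySem.Chars.isspace (cs.getD (p - 1) ' ') = true
          · rw [if_pos hcond, hskip, Aplain_step_hash_true cs p hpn hc3 hcond]
          · rw [if_neg hcond, hskip, Aplain_step_hash_false cs p hpn hc3 hcond]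
            exact ih (p + 1) (by omega)

-- ===== VERDICT (by name: the statement is the Claim_ definition above) =====
theorem strip_yaml_comment_py_spec : Claim_equal_strip_yaml_comment_py := by
  intro raw _
  unfold Spec_strip_yaml_comment_py strip_yaml_comment_py strip_yaml_comment_py_alt
  rw [scanGo_eq raw raw.toList raw.toList.length 0 (le_refl _)]
  rfl
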